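-- pv_equiv track=rewrite | github.com/Euaell/CompProgramming | 2645-minimum-additions-to-make-valid-string/2645-minimum-additions-to-make-valid-string.py | addMinimum
-- ===== SOURCE A (Python) =====
-- def addMinimum(word: str) -> int:
--     n = len(word)
--     target = "abc"
--     i = 0
--
--     ans = 0
--     for j in range(n):
--         while target[i] != word[j]:
--             ans += 1
--             i = (i + 1) % 3
--
--         if target[i] == word[j]:
--             i = (i + 1) % 3
--
--     ans += (3 - i) % 3
--
--     return ans
-- ===== SOURCE B (Python) =====
-- def addMinimum(word: str) -> int:
--     n = len(word)
--     if n == 0: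
--         return 0
--     groups = 1
--     for j in range(1, n):
--         if word[j] <= word[j - 1]:
--             groups += 1
--     return 3 * groups - n
-- ===== Notes on version B (the rewrite author's own statement) =====
-- stated objective: simpler
-- what changed: Replaced the modular target-cursor simulation (inner while over 'abc') with a single adjacency pass counting required 'abc' groups (word[j] <= word[j-1] starts a new group) and the closed form 3*groups - n.
import Mathlib
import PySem

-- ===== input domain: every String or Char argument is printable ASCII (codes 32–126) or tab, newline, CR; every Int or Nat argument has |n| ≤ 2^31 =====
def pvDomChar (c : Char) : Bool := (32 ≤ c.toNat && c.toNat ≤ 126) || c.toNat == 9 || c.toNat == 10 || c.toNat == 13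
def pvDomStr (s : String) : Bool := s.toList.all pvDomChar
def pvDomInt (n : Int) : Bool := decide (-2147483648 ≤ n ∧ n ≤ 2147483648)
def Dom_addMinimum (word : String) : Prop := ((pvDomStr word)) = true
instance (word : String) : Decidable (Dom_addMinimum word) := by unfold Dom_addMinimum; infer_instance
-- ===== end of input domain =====

-- B replaces A's modular target-cursor simulation with one adjacency pass counting 'abc' groups
-- and the closed form 3*groups - n (objective: simpler).

-- ===== PORT A =====
-- A's inner `while target[i] != word[j]` is modelled with fuel 3: for word[j] ∈ {'a','b','c'}
-- (exactly Pre_addMinimum) the cursor reaches word[j] within at most 2 steps, so fuel 3 is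
-- exact there; outside Pre_ the Python loop runs forever.
def pvWhileA : Nat → Char → Int → Int → Int × Int
  | 0, _, i, ans => (i, ans)
  | fuel + 1, c, i, ans =>
    if PySem.Str.pyGet? "abc" i ≠ some c then
      pvWhileA fuel c (PySem.Int.mod (i + 1) 3) (ans + 1)
    else (i, ans)

def pvLoopA : List Char → Int → Int → Int
  | [], i, ans => ans + PySem.Int.mod (3 - i) 3
  | c :: l, i, ans =>
    let p := pvWhileA 3 c i ans
    let i' := if PySem.Str.pyGet? "abc" p.1 = some c then PySem.Int.mod (p.1 + 1) 3 else p.1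
    pvLoopA l i' p.2

def addMinimum (word : String) : Int := pvLoopA word.toList 0 0

-- ===== PORT B =====
-- pvPairs prev l = number of positions in l whose char is ≤ its predecessor (starts a new group)
def pvPairs : Char → List Char → Int
  | _, [] => 0
  | p, c :: l => (if c ≤ p then 1 else 0) + pvPairs c l

def addMinimum_alt (word : String) : Int :=
  match word.toList with
  | [] => 0
  | c :: l => 3 * (1 + pvPairs c l) - (1 + (l.length : Int))

-- ===== PRECONDITION & SPEC =====
-- A loops forever on any character outside {'a','b','c'}; Pre_ admits exactly the words on
-- which the Python A terminates.
def Pre_addMinimum (word : String) : Prop :=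
  word.toList.all (fun c => c == 'a' || c == 'b' || c == 'c') = true
instance (word : String) : Decidable (Pre_addMinimum word) := by unfold Pre_addMinimum; infer_instance
def pvWitness_addMinimum : String := "abacbc"
def Spec_addMinimum (word : String) (out : Int) : Prop := out = addMinimum_alt word
instance (word : String) (out : Int) : Decidable (Spec_addMinimum word out) := by unfold Spec_addMinimum; infer_instance

-- ===== CLAIM (what is proved, stated in full; the proofs are below) =====
def Claim_equal_addMinimum : Prop := ∀ (word : String), Dom_addMinimum word → Pre_addMinimum word → Spec_addMinimum word (addMinimum word)

-- ===== LEMMAS AND PROOFS =====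

-- index of a char in "abc" (proof-only)
def pvIdx (c : Char) : Int := if c = 'a' then 0 else if c = 'b' then 1 else 2

lemma pvStep (c p : Char) (l : List Char) (ans : Int)
    (hc : c = 'a' ∨ c = 'b' ∨ c = 'c') (hp : p = 'a' ∨ p = 'b' ∨ p = 'c') :
    pvLoopA (c :: l) (PySem.Int.mod (pvIdx p + 1) 3) ans =
      pvLoopA l (PySem.Int.mod (pvIdx c + 1) 3)
        (ans + (pvIdx c - pvIdx p - 1 + if c ≤ p then 3 else 0)) := by
  rcases hc with rfl | rfl | rfl <;> rcases hp with rfl | rfl | rfl <;>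
    (simp [pvLoopA, pvWhileA, pvIdx, PySem.Int.mod, PySem.Str.pyGet?, PySem.Chars.pyGet?,
      PySem.List.pyGet?, PySem.List.pyIdx?]; try ring_nf)

lemma pvFirst (c : Char) (l : List Char) (ans : Int)
    (hc : c = 'a' ∨ c = 'b' ∨ c = 'c') :
    pvLoopA (c :: l) 0 ans =
      pvLoopA l (PySem.Int.mod (pvIdx c + 1) 3) (ans + pvIdx c) := by
  rcases hc with rfl | rfl | rfl <;>
    (simp [pvLoopA, pvWhileA, pvIdx, PySem.Int.mod, PySem.Str.pyGet?, PySem.Chars.pyGet?,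
      PySem.List.pyGet?, PySem.List.pyIdx?]; try ring_nf)

lemma pvMain (l : List Char) (hl : ∀ c ∈ l, c = 'a' ∨ c = 'b' ∨ c = 'c') :
    ∀ p, (p = 'a' ∨ p = 'b' ∨ p = 'c') → ∀ ans,
      pvLoopA l (PySem.Int.mod (pvIdx p + 1) 3) ans =
        ans + 3 * pvPairs p l + (2 - pvIdx p) - l.length := by
  induction l with
  | nil =>
    intro p hp ans
    rcases hp with rfl | rfl | rfl <;>
      simp [pvLoopA, pvPairs, pvIdx, PySem.Int.mod]
  | cons c l ih =>
    intro p hp ans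
    have hc : c = 'a' ∨ c = 'b' ∨ c = 'c' := hl c (by simp)
    rw [pvStep c p l ans hc hp,
      ih (fun x hx => hl x (by simp [hx])) c hc]
    simp [pvPairs]
    split_ifs <;> ring

theorem addMinimum_spec : Claim_equal_addMinimum := by
  intro word _ hpre
  unfold Spec_addMinimum addMinimum addMinimum_alt
  cases h : word.toList with
  | nil => simp [pvLoopA, PySem.Int.mod]
  | cons c l =>
    have hall : ∀ x ∈ word.toList, x = 'a' ∨ x = 'b' ∨ x = 'c' := by
      intro x hx
      have h2 := List.all_eq_true.mp hpre x hx
      simp only [Bool.or_eq_true, beq_iff_eq] at h2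
      tauto
    rw [h] at hall
    have hc := hall c (by simp)
    rw [pvFirst c l 0 hc, pvMain l (fun x hx => hall x (by simp [hx])) c hc]
    ring
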